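-- pv_equiv track=rewrite | github.com/hivdb/ngs-alignment-pipeline | patternutils.py | map_posnas_to_initref
-- ===== SOURCE A (Python) =====
-- from collections import defaultdict, Counter
--
-- def map_posnas_to_initref(posnas, initrefnas, alnprofile):
--     """
--     Re-map an iteratively aligned reads to the original reference
--
--     The position numbers of original reference (initref) was lost during
--     the iterative alignment. This generator function restores the position
--     numbers by using information from alignment profile list (alnprofile).
--
--     This generator produces a tuple of three elements:
--       - `position`: The original reference position minus `pos_offset`.
--       - `nas`: Nucleic acid notations of this position. The insertion gap is
--         represented in higher numbers (>1) of `nas`.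
--       - `refna`: Nucleic acid notation of the orig. reference at this positon.
--     """
--     initrefpos_map = defaultdict(list)
--     for refpos, nas, _ in posnas:
--         refpos0 = refpos - 1
--         initrefpos0, modifier = alnprofile[refpos0]
--         initrefpos_map[initrefpos0].append(nas)
--         while modifier > 0:
--             initrefpos0 += 1
--             modifier -= 1
--             initrefpos_map[initrefpos0].append('-')
--     for initrefpos0, nas in sorted(initrefpos_map.items()):
--         nas = ''.join(nas)
--         if len(nas) > 1:
--             # remove next-to-insertion deletions
--             nas = nas.replace('-', '')
--         initrefpos = initrefpos0 + 1
--         refna = initrefnas[initrefpos0]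
--         yield initrefpos, nas, refna
-- ===== SOURCE B (Python) =====
-- def map_posnas_to_initref(posnas, initrefnas, alnprofile):
--     # Flatten every read into a flat stream of (position, piece) events,
--     # stably sort the stream by position, then emit one tuple per run of
--     # equal positions (sort-then-group); no per-position aggregation map.
--     events = []
--     for refpos, nas, _ in posnas:
--         initrefpos0, modifier = alnprofile[refpos - 1]
--         events.append((initrefpos0, nas))
--         for k in range(1, modifier + 1):
--             events.append((initrefpos0 + k, '-'))
--     events.sort(key=lambda e: e[0])  # stable: per-position piece order kept
--     i, n = 0, len(events)
--     while i < n: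
--         p0 = events[i][0]
--         j = i
--         while j < n and events[j][0] == p0:
--             j += 1
--         nas = ''.join(e[1] for e in events[i:j])
--         if len(nas) > 1:
--             # remove next-to-insertion deletions
--             nas = nas.replace('-', '')
--         yield p0 + 1, nas, initrefnas[p0]
--         i = j
-- ===== Notes on version B (the rewrite author's own statement) =====
-- stated objective: alternative
-- what changed: Replaces A's per-position defaultdict aggregation followed by sorting the dict items with a flat (position, piece) event stream that is stably sorted once and then scanned, emitting one tuple per run of equal positions (sort-then-group instead of hash aggregation).
import Mathlib
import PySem

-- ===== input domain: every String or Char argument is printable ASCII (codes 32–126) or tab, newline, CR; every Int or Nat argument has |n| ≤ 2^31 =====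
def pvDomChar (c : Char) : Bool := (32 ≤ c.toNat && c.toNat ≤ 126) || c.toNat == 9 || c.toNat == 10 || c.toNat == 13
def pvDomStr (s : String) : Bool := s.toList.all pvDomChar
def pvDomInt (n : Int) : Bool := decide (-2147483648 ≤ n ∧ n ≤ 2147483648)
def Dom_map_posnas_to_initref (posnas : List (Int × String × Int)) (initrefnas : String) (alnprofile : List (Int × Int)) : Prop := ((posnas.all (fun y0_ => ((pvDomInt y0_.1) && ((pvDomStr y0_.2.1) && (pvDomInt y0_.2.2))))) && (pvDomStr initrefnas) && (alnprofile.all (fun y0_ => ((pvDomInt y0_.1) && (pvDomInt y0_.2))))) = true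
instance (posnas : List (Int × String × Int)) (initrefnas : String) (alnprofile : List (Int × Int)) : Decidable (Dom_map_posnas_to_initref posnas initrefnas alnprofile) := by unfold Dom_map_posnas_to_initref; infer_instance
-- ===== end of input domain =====

-- B replaces A's defaultdict aggregation + sorted(items) by a flat (position, piece) event
-- stream that is stably sorted once and then scanned, one output tuple per run of equal positions.

-- ===== PORT A =====
-- per-position post-processing shared verbatim by both Pythons: join the collected pieces,
-- strip '-' when longer than one char, read the reference nucleotide (IndexError → Pre_ excludes)
def pvProcess (initrefnas : String) (item : Int × List String) : Int × String × String :=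
  let nas := PySem.Str.join "" item.2
  let nas := if 1 < PySem.Str.len nas then PySem.Str.replace nas "-" "" else nas
  let refna := match PySem.Str.pyGet? initrefnas item.1 with
    | some c => String.ofList [c]
    | none => ""  -- Python raises IndexError here; excluded by Pre_
  (item.1 + 1, nas, refna)

-- A's 'while modifier > 0: initrefpos0 += 1; modifier -= 1; append("-")'
def pvDashLoop (d : PySem.Dict Int (List String)) (p0 m : Int) : PySem.Dict Int (List String) :=
  if 0 < m then pvDashLoop (d.modify (p0 + 1) [] (fun v => v ++ ["-"])) (p0 + 1) (m - 1) else d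
termination_by m.toNat
decreasing_by omega

def map_posnas_to_initref (posnas : List (Int × String × Int)) (initrefnas : String) (alnprofile : List (Int × Int)) : List (Int × String × String) :=
  let d := posnas.foldl (fun d x =>
    match PySem.List.pyGet? alnprofile (x.1 - 1) with
    | none => d  -- Python raises IndexError here; excluded by Pre_
    | some pm => pvDashLoop (d.modify pm.1 [] (fun v => v ++ [x.2.1])) pm.1 pm.2) PySem.Dict.empty
  -- sorted(initrefpos_map.items()): the dict's keys are distinct, so Python's tuple sort
  -- never reaches the second component; key = fst is the exact same comparison
  (PySem.List.sorted d.items (fun it => it.1) false).map (pvProcess initrefnas)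

-- ===== PORT B =====
-- the events one read appends to the flat stream: (initrefpos0, nas) then one ('-') per gap
def pvExpand (alnprofile : List (Int × Int)) (x : Int × String × Int) : List (Int × String) :=
  match PySem.List.pyGet? alnprofile (x.1 - 1) with
  | none => []  -- Python raises IndexError here; excluded by Pre_
  | some pm => (pm.1, x.2.1) :: (PySem.List.pyRange 1 (pm.2 + 1) 1).map (fun k => (pm.1 + k, "-"))

-- B's grouping scan: one (position, pieces) per maximal run of equal positions
def pvGroup : List (Int × String) → List (Int × List String)
  | [] => []
  | (k, s) :: rest =>
    (k, s :: (rest.takeWhile (fun q => q.1 == k)).map (fun q => q.2)) ::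
      pvGroup (rest.dropWhile (fun q => q.1 == k))
termination_by l => l.length
decreasing_by
  exact Nat.lt_succ_of_le (List.length_dropWhile_le _ _)

def map_posnas_to_initref_alt (posnas : List (Int × String × Int)) (initrefnas : String) (alnprofile : List (Int × Int)) : List (Int × String × String) :=
  let events := posnas.foldl (fun acc x => acc ++ pvExpand alnprofile x) []
  (pvGroup (PySem.List.sorted events (fun e => e.1) false)).map (pvProcess initrefnas)

-- ===== PRECONDITION & SPEC =====
-- Pre_ excludes exactly the inputs on which the Python A raises IndexError: a read position
-- outside alnprofile's (Python) index range, or an alignment-profile entry whose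
-- initial-reference position (with its gap modifier) falls outside initrefnas's index
-- range [-len, len).
def pvOkEntry (initrefnas : String) (alnprofile : List (Int × Int)) (rp : Int) : Bool :=
  match PySem.List.pyGet? alnprofile (rp - 1) with
  | some pm => decide (-(initrefnas.toList.length : Int) ≤ pm.1 ∧ pm.1 + max pm.2 0 < (initrefnas.toList.length : Int))
  | none => false

def Pre_map_posnas_to_initref (posnas : List (Int × String × Int)) (initrefnas : String) (alnprofile : List (Int × Int)) : Prop :=
  ∀ x ∈ posnas, pvOkEntry initrefnas alnprofile x.1 = true

instance (posnas : List (Int × String × Int)) (initrefnas : String) (alnprofile : List (Int × Int)) : Decidable (Pre_map_posnas_to_initref posnas initrefnas alnprofile) := by unfold Pre_map_posnas_to_initref; infer_instance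

def pvWitness_map_posnas_to_initref : (List (Int × String × Int)) × String × (List (Int × Int)) := ([(1, "A", 0)], "CG", [(0, 1)])

def Spec_map_posnas_to_initref (posnas : List (Int × String × Int)) (initrefnas : String) (alnprofile : List (Int × Int)) (out : List (Int × String × String)) : Prop := out = map_posnas_to_initref_alt posnas initrefnas alnprofile
instance (posnas : List (Int × String × Int)) (initrefnas : String) (alnprofile : List (Int × Int)) (out : List (Int × String × String)) : Decidable (Spec_map_posnas_to_initref posnas initrefnas alnprofile out) := by unfold Spec_map_posnas_to_initref; infer_instance

-- ===== CLAIM (what is proved, stated in full; the proofs are below) =====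
def Claim_equal_map_posnas_to_initref : Prop := ∀ (posnas : List (Int × String × Int)) (initrefnas : String) (alnprofile : List (Int × Int)), Dom_map_posnas_to_initref posnas initrefnas alnprofile → Pre_map_posnas_to_initref posnas initrefnas alnprofile → Spec_map_posnas_to_initref posnas initrefnas alnprofile (map_posnas_to_initref posnas initrefnas alnprofile)

-- ===== LEMMAS AND PROOFS =====

-- A's dash loop, flattened to one fold over the gap positions of the read
theorem pvDashLoop_eq (m p0 : Int) (d : PySem.Dict Int (List String)) :
    pvDashLoop d p0 m = ((PySem.List.pyRange 1 (m + 1) 1).map (fun k => (p0 + k, "-"))).foldl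
      (fun d q => d.modify q.1 [] (fun v => v ++ [q.2])) d := by
  induction d, p0, m using pvDashLoop.induct with
  | case1 d p0 m hm ih =>
    rw [pvDashLoop, if_pos hm, ih]
    rw [PySem.List.pyRange_one_cons (by omega : (1:Int) < m + 1)]
    simp only [List.map_cons, List.foldl_cons]
    congr 1
    rw [PySem.List.pyRange_one, PySem.List.pyRange_one]
    simp only [List.map_map]
    have h2 : (m + 1 - (1+1)).toNat = (m - 1 + 1 - 1).toNat := by omega
    rw [h2]
    apply List.map_congr_left
    intro k _
    simp only [Function.comp_apply]
    apply Prod.ext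
    · simp; ring
    · rfl
  | case2 d p0 m hm =>
    rw [pvDashLoop, if_neg hm, PySem.List.pyRange_one_eq_nil (by omega)]
    rfl

-- A's dict-building loop = one fold over the flat event stream
theorem pvDictFold_eq (posnas : List (Int × String × Int)) (alnprofile : List (Int × Int))
    (d : PySem.Dict Int (List String)) :
    posnas.foldl (fun d x =>
      match PySem.List.pyGet? alnprofile (x.1 - 1) with
      | none => d
      | some pm => pvDashLoop (d.modify pm.1 [] (fun v => v ++ [x.2.1])) pm.1 pm.2) d
    = (posnas.flatMap (pvExpand alnprofile)).foldl
        (fun d q => d.modify q.1 [] (fun v => v ++ [q.2])) d := by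
  induction posnas generalizing d with
  | nil => rfl
  | cons x xs ih =>
    simp only [List.foldl_cons, List.flatMap_cons, List.foldl_append, ih]
    congr 1
    unfold pvExpand
    cases PySem.List.pyGet? alnprofile (x.1 - 1) with
    | none => rfl
    | some pm => simp only []; rw [pvDashLoop_eq]; rfl

-- inserting by strict key order into a key-sorted list appends among equal keys: stability step
theorem pvFilter_insertBy (x : Int × String) (ys : List (Int × String))
    (hs : ys.Pairwise (fun a b => a.1 ≤ b.1)) (k : Int) :
    (PySem.List.insertBy (fun a b => decide (a.1 < b.1)) x ys).filter (fun e => e.1 == k)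
    = ys.filter (fun e => e.1 == k) ++ (if x.1 == k then [x] else []) := by
  induction ys with
  | nil =>
    rw [PySem.List.insertBy]
    by_cases h : x.1 = k <;> simp [h]
  | cons y ys ih =>
    rcases List.pairwise_cons.mp hs with ⟨hy, ht⟩
    rw [PySem.List.insertBy]
    split
    · next hlt =>
      have hxy : x.1 < y.1 := of_decide_eq_true hlt
      by_cases hxk : x.1 = k
      · have h1 : (x.1 == k) = true := by simpa using hxk
        have h2 : (y :: ys).filter (fun e => e.1 == k) = [] := by
          rw [List.filter_eq_nil_iff]
          intro e he
          rcases List.mem_cons.mp he with rfl | he'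
          · simp; omega
          · have := hy e he'
            simp; omega
        simp only [List.filter_cons, h1, h2]
        simp
      · have h1 : (x.1 == k) = false := by simpa using hxk
        simp only [List.filter_cons, h1]
        simp
    · next hlt =>
      rw [List.filter_cons, List.filter_cons, ih ht]
      split <;> simp
-- stability of the stable sort: the run of key k in sorted order is the k-filter of the input
theorem pvSorted_filter_stable (E : List (Int × String)) (k : Int) :
    (PySem.List.sorted E (fun e => e.1) false).filter (fun e => e.1 == k)
    = E.filter (fun e => e.1 == k) := by
  induction E using List.reverseRecOn with
  | nil => rfl
  | append_singleton E x ih =>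
    have hstep : PySem.List.sorted (E ++ [x]) (fun e => e.1) false
        = PySem.List.insertBy (fun a b => decide (a.1 < b.1)) x
            (PySem.List.sorted E (fun e => e.1) false) := by
      rw [PySem.List.sorted_eq_foldl_insertBy, PySem.List.sorted_eq_foldl_insertBy,
        List.foldl_append, List.foldl_cons, List.foldl_nil]
    rw [hstep, pvFilter_insertBy x _ (PySem.List.sorted_pairwise E (fun e => e.1)) k, ih,
      List.filter_append]
    congr 1
    by_cases hxk : x.1 = k
    · simp [hxk]
    · simp [hxk]

-- in a list whose order never puts a ¬p element before a p element, filter p is takeWhile p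
theorem pvFilter_eq_takeWhile {α : Type} (p : α → Bool) (l : List α)
    (h : l.Pairwise (fun a b => p b = true → p a = true)) :
    l.filter p = l.takeWhile p := by
  induction l with
  | nil => rfl
  | cons x xs ih =>
    rcases List.pairwise_cons.mp h with ⟨hx, ht⟩
    by_cases hpx : p x = true
    · rw [List.filter_cons_of_pos hpx, List.takeWhile_cons_of_pos hpx, ih ht]
    · rw [List.filter_cons_of_neg (by simpa using hpx), List.takeWhile_cons_of_neg (by simpa using hpx)]
      rw [List.filter_eq_nil_iff]
      intro a ha hpa
      exact hpx (hx a ha hpa)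

-- a key-sorted list is the concatenation, over any strictly increasing list covering its keys,
-- of its per-key filters (the block shape B's grouping scan consumes)
theorem pvSortedDecomp (ks : List Int) (l : List (Int × String))
    (hks : ks.Pairwise (· < ·)) (hl : l.Pairwise (fun a b => a.1 ≤ b.1))
    (hmem : ∀ e ∈ l, e.1 ∈ ks) :
    l = ks.flatMap (fun k => l.filter (fun e => e.1 == k)) := by
  induction ks generalizing l with
  | nil =>
    cases l with
    | nil => rfl
    | cons e es => exact absurd (hmem e (by simp)) (by simp)
  | cons k ks ih =>
    rcases List.pairwise_cons.mp hks with ⟨hk, hks'⟩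
    have hA : l.filter (fun e => e.1 == k) = l.takeWhile (fun e => e.1 == k) := by
      apply pvFilter_eq_takeWhile
      refine hl.imp_of_mem ?_
      intro a b ha hb hab hbk
      have hbk' : b.1 = k := by simpa using hbk
      have hak : a.1 ∈ k :: ks := hmem a ha
      rcases List.mem_cons.mp hak with h | h
      · simpa using h
      · have := hk _ h
        simp
        omega
    set B := l.dropWhile (fun e => e.1 == k) with hB
    have hsplit : l = l.filter (fun e => e.1 == k) ++ B := by
      rw [hA, hB, List.takeWhile_append_dropWhile]
    have hBnot : ∀ e ∈ B, ¬ (e.1 == k) = true := by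
      have hcount : l.countP (fun e => e.1 == k)
          = l.countP (fun e => e.1 == k) + B.countP (fun e => e.1 == k) := by
        conv_lhs => rw [hsplit]
        rw [List.countP_append, List.countP_filter]
        simp
      have h0 : B.countP (fun e => e.1 == k) = 0 := by omega
      intro e he
      exact List.countP_eq_zero.mp h0 e he
    have hBpair : B.Pairwise (fun a b => a.1 ≤ b.1) :=
      hl.sublist (List.dropWhile_sublist _)
    have hBmem : ∀ e ∈ B, e.1 ∈ ks := by
      intro e he
      have : e.1 ∈ k :: ks := hmem e ((List.dropWhile_sublist _).mem he)
      rcases List.mem_cons.mp this with h | h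
      · exact absurd (by simpa using h) (hBnot e he)
      · exact h
    have hfilterB : ∀ k' ∈ ks, l.filter (fun e => e.1 == k') = B.filter (fun e => e.1 == k') := by
      intro k' hk'
      conv_lhs => rw [hsplit]
      rw [List.filter_append]
      have hnil : (l.filter (fun e => e.1 == k)).filter (fun e => e.1 == k') = [] := by
        rw [List.filter_eq_nil_iff]
        intro e he h'
        have h1 : e.1 = k := by simpa using List.of_mem_filter he
        have h2 : e.1 = k' := by simpa using h'
        have := hk _ hk'
        omega
      rw [hnil, List.nil_append]
    rw [List.flatMap_cons]
    conv_lhs => rw [hsplit]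
    congr 1
    rw [ih B hks' hBpair hBmem]
    exact List.flatMap_congr (fun k' hk' => (hfilterB k' hk').symm)

-- grouping a concatenation of nonempty single-key blocks with strictly increasing keys
theorem pvGroup_flatMap (ks : List Int) (f : Int → List (Int × String))
    (hks : ks.Pairwise (· < ·))
    (hne : ∀ k ∈ ks, f k ≠ [])
    (hkey : ∀ k ∈ ks, ∀ e ∈ f k, e.1 = k) :
    pvGroup (ks.flatMap f) = ks.map (fun k => (k, (f k).map (fun e => e.2))) := by
  induction ks with
  | nil => simp [pvGroup]
  | cons k ks ih =>
    rcases List.pairwise_cons.mp hks with ⟨hk, hks'⟩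
    have hrest : ∀ e ∈ ks.flatMap f, (e.1 == k) = false := by
      intro e he
      rw [List.mem_flatMap] at he
      obtain ⟨k', hk', he'⟩ := he
      have := hkey k' (by simp [hk']) e he'
      have := hk _ hk'
      simp
      omega
    cases hfk : f k with
    | nil => exact absurd hfk (hne k (by simp))
    | cons e0 es =>
      obtain ⟨k0, s0⟩ := e0
      have hk0 : k0 = k := hkey k (by simp) (k0, s0) (by simp [hfk])
      subst hk0
      have hes : ∀ e ∈ es, (e.1 == k0) = true := by
        intro e he
        simpa using hkey k0 (by simp) e (by simp [hfk, he])
      rw [List.flatMap_cons, hfk, List.cons_append, pvGroup]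
      have htake : (es ++ ks.flatMap f).takeWhile (fun q => q.1 == k0)
          = es ++ (ks.flatMap f).takeWhile (fun q => q.1 == k0) :=
        List.takeWhile_append_of_pos hes
      have htake2 : (ks.flatMap f).takeWhile (fun q => q.1 == k0) = [] := by
        cases hr : ks.flatMap f with
        | nil => rfl
        | cons r rs =>
          rw [List.takeWhile_cons_of_neg]
          simp [hrest r (by simp [hr])]
      have hdrop : (es ++ ks.flatMap f).dropWhile (fun q => q.1 == k0)
          = (ks.flatMap f).dropWhile (fun q => q.1 == k0) :=
        List.dropWhile_append_of_pos hes
      have hdrop2 : (ks.flatMap f).dropWhile (fun q => q.1 == k0) = ks.flatMap f := by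
        cases hr : ks.flatMap f with
        | nil => rfl
        | cons r rs =>
          rw [List.dropWhile_cons_of_neg]
          simp [hrest r (by simp [hr])]
      rw [htake, htake2, hdrop, hdrop2, List.append_nil,
        ih hks' (fun k' h => hne k' (by simp [h])) (fun k' h => hkey k' (by simp [h])),
        List.map_cons, hfk]
      simp

-- ===== VERDICT (by name: the statement is the Claim_ definition above) =====
theorem map_posnas_to_initref_spec : Claim_equal_map_posnas_to_initref := by
  intro posnas initrefnas alnprofile _hdom _hpre
  show map_posnas_to_initref posnas initrefnas alnprofile
    = map_posnas_to_initref_alt posnas initrefnas alnprofile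
  simp only [map_posnas_to_initref, map_posnas_to_initref_alt]
  rw [pvDictFold_eq, PySem.List.foldl_append_eq_flatMap, List.nil_append]
  set E : List (Int × String) := posnas.flatMap (pvExpand alnprofile) with hE
  set dfin : PySem.Dict Int (List String) :=
    E.foldl (fun d q => d.modify q.1 [] (fun v => v ++ [q.2])) PySem.Dict.empty with hdfin
  set S : List (Int × String) := PySem.List.sorted E (fun e => e.1) false with hS
  set ks : List Int := PySem.List.sorted (PySem.Set.ofList (E.map (fun e => e.1)))
    (fun x => x) false with hks
  have hkspair : ks.Pairwise (· < ·) := PySem.List.sorted_ofList_pairwise_lt _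
  -- the dict's keys: the distinct positions of the event stream
  have hkeys : dfin.keys = PySem.Set.ofList (E.map (fun q => q.1)) := by
    rw [hdfin, PySem.Dict.keys_foldl_modify_key E (fun q => q.1) [] (fun _ q => fun v => v ++ [q.2])]
    exact PySem.Set.update_nil_left _
  have hnodup : dfin.keys.Nodup := by rw [hkeys]; exact PySem.Set.nodup_ofList _
  -- dict lookup = the per-position filter of the event stream
  have hdget : ∀ c : Int, dfin.getD c [] = (E.filter (fun q => q.1 == c)).map (fun q => q.2) := by
    intro c
    rw [hdfin, PySem.Dict.getD_foldl_modify_append]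
    rfl
  -- A's sorted dict items: one pair per distinct position, in increasing order
  have hsorted : PySem.List.sorted dfin.items (fun it => it.1) false
      = ks.map (fun k => (k, dfin.getD k [])) := by
    refine PySem.List.sorted_eq_of_perm_of_pairwise_lt (κ := Int) dfin.items _ (fun it => it.1) ?_ ?_
    · have h1 : dfin.items = dfin.keys.map (fun k => (k, dfin.getD k [])) :=
        PySem.Dict.items_eq_map_keys dfin hnodup []
      rw [h1, hkeys]
      exact List.Perm.map _ (PySem.List.sorted_perm _ _ _)
    · exact List.Pairwise.map _ (fun a b h => h) hkspair
  rw [hsorted]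
  -- B's sorted event stream decomposes into the per-position blocks
  have hSpair : S.Pairwise (fun a b => a.1 ≤ b.1) := PySem.List.sorted_pairwise E (fun e => e.1)
  have hSmem : ∀ e ∈ S, e.1 ∈ ks := by
    intro e he
    rw [hS, PySem.List.mem_sorted] at he
    rw [hks, PySem.List.mem_sorted, PySem.Set.mem_ofList]
    exact List.mem_map_of_mem he
  have hdecomp : S = ks.flatMap (fun k => S.filter (fun e => e.1 == k)) :=
    pvSortedDecomp ks S hkspair hSpair hSmem
  have hstable : ∀ k : Int, S.filter (fun e => e.1 == k) = E.filter (fun e => e.1 == k) := by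
    intro k
    rw [hS]
    exact pvSorted_filter_stable E k
  have hgroup : pvGroup S = ks.map (fun k => (k, (S.filter (fun e => e.1 == k)).map (fun e => e.2))) := by
    conv_lhs => rw [hdecomp]
    apply pvGroup_flatMap ks _ hkspair
    · intro k hk
      rw [hks, PySem.List.mem_sorted, PySem.Set.mem_ofList, List.mem_map] at hk
      obtain ⟨e, he, rfl⟩ := hk
      rw [hstable]
      intro hcon
      rw [List.filter_eq_nil_iff] at hcon
      exact hcon e he (by simp)
    · intro k _ e he
      simpa using (List.mem_filter.mp he).2
  rw [hgroup, List.map_map, List.map_map]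
  apply List.map_congr_left
  intro k _
  simp only [Function.comp_apply, hdget, hstable]
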